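-- pv_equiv track=rewrite | github.com/tcardella/AdventOfCode | 2024/test_2024_15.py | is_against_wall
-- ===== SOURCE A (Python) =====
-- def is_against_wall(grid, r, c, dr, dc, box_size=1):
--     nr, nc = r + dr, c + dc
--     if grid[nr][nc] == '#':
--         return True
--     elif grid[nr][nc] == '.':
--         return False
--     elif box_size == 1:
--         if grid[nr][nc] == 'O':
--             return is_against_wall(grid, nr, nc, dr, dc, box_size)
--     elif box_size == 2:
--         return is_against_wall(grid, nr, nc, dr, dc, box_size)
--     else:
--         return False
-- ===== SOURCE B (Python) =====
-- def is_against_wall(grid, r, c, dr, dc, box_size=1):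
--     # Iterative re-implementation: dispatch on box_size once, then walk the ray with a loop.
--     if box_size == 1:
--         while True:
--             r += dr; c += dc
--             cell = grid[r][c]
--             if cell == '#':
--                 return True
--             if cell == '.':
--                 return False
--             if cell == 'O':
--                 continue
--             return None
--     elif box_size == 2:
--         while True:
--             r += dr; c += dc
--             cell = grid[r][c]
--             if cell == '#':
--                 return True
--             if cell == '.':
--                 return False
--     else:
--         return grid[r + dr][c + dc] == '#'
-- ===== Notes on version B (the rewrite author's own statement) =====
-- stated objective: alternative
-- what changed: B dispatches on box_size once and then walks the ray with an iterative while-loop keeping only the moving position, instead of A's tail recursion that re-tests box_size at every step.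
-- outside the precondition, e.g. on is_against_wall(['OX'], 0, -1, 0, 1, 1): A returns None, B returns None
import Mathlib
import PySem

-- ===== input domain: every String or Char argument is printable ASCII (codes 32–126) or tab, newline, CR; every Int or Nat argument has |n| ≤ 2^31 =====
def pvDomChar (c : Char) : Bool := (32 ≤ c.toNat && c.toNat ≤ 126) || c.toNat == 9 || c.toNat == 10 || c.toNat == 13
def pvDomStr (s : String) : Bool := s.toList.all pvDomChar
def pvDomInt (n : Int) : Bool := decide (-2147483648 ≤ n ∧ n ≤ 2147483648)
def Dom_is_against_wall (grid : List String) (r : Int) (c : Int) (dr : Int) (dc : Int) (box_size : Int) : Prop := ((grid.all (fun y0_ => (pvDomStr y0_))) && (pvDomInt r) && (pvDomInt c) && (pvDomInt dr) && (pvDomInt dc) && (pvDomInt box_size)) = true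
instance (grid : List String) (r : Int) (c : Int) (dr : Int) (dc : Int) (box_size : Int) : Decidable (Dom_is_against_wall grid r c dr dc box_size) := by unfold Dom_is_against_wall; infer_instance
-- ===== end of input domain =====

-- B replaces A's tail recursion (which re-tests box_size at every step) by a single dispatch on
-- box_size followed by an iterative walk of the ray; same return value wherever A returns a bool.

-- grid[i][j] with Python indexing: none = IndexError
def pvCellAt (grid : List String) (i j : Int) : Option Char :=
  match PySem.List.pyGet? grid i with
  | none => none
  | some s => PySem.Str.pyGet? s j

-- fuel bound: a terminating walk inside the grid takes fewer steps than this
def pvFuel (grid : List String) : Nat := 2 * (grid.length + (grid.map (fun s => s.length)).sum) + 2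

-- ===== PORT A =====
-- A's recursion, with a fuel guard (Pre_ guarantees the walk returns before fuel runs out);
-- the `false` in the fuel-0, IndexError and fall-off-the-end (Python None) cases is unreachable under Pre_.
def pvAWalk (grid : List String) (dr : Int) (dc : Int) (box_size : Int) : Int → Int → Nat → Bool
  | _, _, 0 => false
  | r, c, Nat.succ fuel =>
    let nr := r + dr
    let nc := c + dc
    match pvCellAt grid nr nc with
    | none => false
    | some ch =>
      if ch = '#' then true
      else if ch = '.' then false
      else if box_size = 1 then
        (if ch = 'O' then pvAWalk grid dr dc box_size nr nc fuel else false)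
      else if box_size = 2 then pvAWalk grid dr dc box_size nr nc fuel
      else false

def is_against_wall (grid : List String) (r : Int) (c : Int) (dr : Int) (dc : Int) (box_size : Int) : Bool :=
  pvAWalk grid dr dc box_size r c (pvFuel grid)

-- ===== PORT B =====
-- the box_size == 1 while-loop of B
def pvBLoop1 (grid : List String) (dr : Int) (dc : Int) : Int → Int → Nat → Bool
  | _, _, 0 => false
  | r, c, Nat.succ fuel =>
    match pvCellAt grid (r + dr) (c + dc) with
    | some '#' => true
    | some '.' => false
    | some 'O' => pvBLoop1 grid dr dc (r + dr) (c + dc) fuel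
    | _ => false

-- the box_size == 2 while-loop of B
def pvBLoop2 (grid : List String) (dr : Int) (dc : Int) : Int → Int → Nat → Bool
  | _, _, 0 => false
  | r, c, Nat.succ fuel =>
    match pvCellAt grid (r + dr) (c + dc) with
    | some '#' => true
    | some '.' => false
    | some _ => pvBLoop2 grid dr dc (r + dr) (c + dc) fuel
    | none => false

def is_against_wall_alt (grid : List String) (r : Int) (c : Int) (dr : Int) (dc : Int) (box_size : Int) : Bool :=
  if box_size = 1 then pvBLoop1 grid dr dc r c (pvFuel grid)
  else if box_size = 2 then pvBLoop2 grid dr dc r c (pvFuel grid)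
  else match pvCellAt grid (r + dr) (c + dc) with
       | some ch => ch == '#'
       | none => false

-- ===== PRECONDITION & SPEC =====
-- the cell the walk inspects at step k
def pvStep (grid : List String) (r c dr dc : Int) (k : Nat) : Option Char :=
  pvCellAt grid (r + (k + 1) * dr) (c + (k + 1) * dc)

def pvTerm (o : Option Char) : Bool := o == some '#' || o == some '.'

def pvPass (box_size : Int) (o : Option Char) : Bool :=
  match o with
  | some ch => !(ch == '#') && !(ch == '.') && (!(box_size == 1) || ch == 'O')
  | none => false

-- Pre_ excludes exactly the inputs where Python A does not return a bool: an IndexError on the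
-- walk, a RecursionError (the walk never terminates), or an implicit None return (box_size 1 and a
-- cell that is none of '#', '.', 'O'); i.e. it requires the walk to reach '#' or '.' through
-- pass-through cells (for box_size outside {1,2}, just that the first cell exists).
def Pre_is_against_wall (grid : List String) (r : Int) (c : Int) (dr : Int) (dc : Int) (box_size : Int) : Prop :=
  if box_size = 1 ∨ box_size = 2 then
    ∃ k < pvFuel grid, pvTerm (pvStep grid r c dr dc k) = true ∧
      ∀ j < k, pvPass box_size (pvStep grid r c dr dc j) = true
  else (pvCellAt grid (r + dr) (c + dc)).isSome = true

instance (grid : List String) (r : Int) (c : Int) (dr : Int) (dc : Int) (box_size : Int) : Decidable (Pre_is_against_wall grid r c dr dc box_size) := by unfold Pre_is_against_wall; infer_instance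

def pvWitness_is_against_wall : List String × Int × Int × Int × Int × Int := (["O#"], 0, -1, 0, 1, 1)

def Spec_is_against_wall (grid : List String) (r : Int) (c : Int) (dr : Int) (dc : Int) (box_size : Int) (out : Bool) : Prop := out = is_against_wall_alt grid r c dr dc box_size
instance (grid : List String) (r : Int) (c : Int) (dr : Int) (dc : Int) (box_size : Int) (out : Bool) : Decidable (Spec_is_against_wall grid r c dr dc box_size out) := by unfold Spec_is_against_wall; infer_instance

-- ===== CLAIM (what is proved, stated in full; the proofs are below) =====
def Claim_equal_is_against_wall : Prop := ∀ (grid : List String) (r : Int) (c : Int) (dr : Int) (dc : Int) (box_size : Int), Dom_is_against_wall grid r c dr dc box_size → Pre_is_against_wall grid r c dr dc box_size → Spec_is_against_wall grid r c dr dc box_size (is_against_wall grid r c dr dc box_size)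

-- ===== LEMMAS AND PROOFS =====

lemma pvStep_shift (grid : List String) (r c dr dc : Int) (j : Nat) :
    pvStep grid (r + dr) (c + dc) dr dc j = pvStep grid r c dr dc (j + 1) := by
  unfold pvStep
  congr 1 <;> push_cast <;> ring

lemma pvStep_zero (grid : List String) (r c dr dc : Int) :
    pvStep grid r c dr dc 0 = pvCellAt grid (r + dr) (c + dc) := by
  unfold pvStep; norm_num

lemma pvA_eq_loop1 (grid : List String) (dr dc : Int) :
    ∀ fuel k r c, k < fuel → pvTerm (pvStep grid r c dr dc k) = true →
      (∀ j < k, pvPass 1 (pvStep grid r c dr dc j) = true) →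
      pvAWalk grid dr dc 1 r c fuel = pvBLoop1 grid dr dc r c fuel := by
  intro fuel
  induction fuel with
  | zero => intro k r c hk; omega
  | succ fuel ih =>
    intro k r c hk hterm hpass
    rw [pvAWalk, pvBLoop1]
    cases k with
    | zero =>
      rw [pvStep_zero] at hterm
      cases hcell : pvCellAt grid (r + dr) (c + dc) with
      | none => simp [hcell, pvTerm] at hterm
      | some ch =>
        rw [hcell] at hterm
        simp only [pvTerm, beq_iff_eq, Option.some.injEq, Bool.or_eq_true] at hterm
        rcases hterm with h | h <;> subst h <;> simp
    | succ k' =>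
      have h0 := hpass 0 (Nat.succ_pos k')
      rw [pvStep_zero] at h0
      cases hcell : pvCellAt grid (r + dr) (c + dc) with
      | none => simp [hcell, pvPass] at h0
      | some ch =>
        rw [hcell] at h0
        simp only [pvPass, Bool.and_eq_true, Bool.not_eq_true', beq_eq_false_iff_ne, ne_eq,
          Bool.or_eq_true, beq_iff_eq] at h0
        obtain ⟨⟨hn1, hn2⟩, hO⟩ := h0
        have hO' : ch = 'O' := by
          rcases hO with h | h
          · simp at h
          · exact h
        subst hO'
        simp only [if_neg hn1, if_neg hn2]
        have hterm' : pvTerm (pvStep grid (r + dr) (c + dc) dr dc k') = true := by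
          rw [pvStep_shift]; exact hterm
        have hpass' : ∀ j < k', pvPass 1 (pvStep grid (r + dr) (c + dc) dr dc j) = true := by
          intro j hj
          rw [pvStep_shift]
          exact hpass (j + 1) (by omega)
        exact ih k' (r + dr) (c + dc) (by omega) hterm' hpass'

lemma pvA_eq_loop2 (grid : List String) (dr dc : Int) :
    ∀ fuel k r c, k < fuel → pvTerm (pvStep grid r c dr dc k) = true →
      (∀ j < k, pvPass 2 (pvStep grid r c dr dc j) = true) →
      pvAWalk grid dr dc 2 r c fuel = pvBLoop2 grid dr dc r c fuel := by
  intro fuel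
  induction fuel with
  | zero => intro k r c hk; omega
  | succ fuel ih =>
    intro k r c hk hterm hpass
    rw [pvAWalk, pvBLoop2]
    cases k with
    | zero =>
      rw [pvStep_zero] at hterm
      cases hcell : pvCellAt grid (r + dr) (c + dc) with
      | none => simp [hcell, pvTerm] at hterm
      | some ch =>
        rw [hcell] at hterm
        simp only [pvTerm, beq_iff_eq, Option.some.injEq, Bool.or_eq_true] at hterm
        rcases hterm with h | h <;> subst h <;> simp
    | succ k' =>
      have h0 := hpass 0 (Nat.succ_pos k')
      rw [pvStep_zero] at h0
      cases hcell : pvCellAt grid (r + dr) (c + dc) with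
      | none => simp [hcell, pvPass] at h0
      | some ch =>
        rw [hcell] at h0
        simp only [pvPass, Bool.and_eq_true, Bool.not_eq_true', beq_eq_false_iff_ne, ne_eq] at h0
        obtain ⟨⟨hn1, hn2⟩, -⟩ := h0
        simp only [if_neg hn1, if_neg hn2]
        norm_num
        have hterm' : pvTerm (pvStep grid (r + dr) (c + dc) dr dc k') = true := by
          rw [pvStep_shift]; exact hterm
        have hpass' : ∀ j < k', pvPass 2 (pvStep grid (r + dr) (c + dc) dr dc j) = true := by
          intro j hj
          rw [pvStep_shift]
          exact hpass (j + 1) (by omega)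
        exact ih k' (r + dr) (c + dc) (by omega) hterm' hpass'

-- ===== VERDICT (by name: the statement is the Claim_ definition above) =====
theorem is_against_wall_spec : Claim_equal_is_against_wall := by
  intro grid r c dr dc box_size _ hpre
  unfold Spec_is_against_wall is_against_wall is_against_wall_alt
  unfold Pre_is_against_wall at hpre
  by_cases h1 : box_size = 1
  · subst h1
    rw [if_pos (Or.inl rfl)] at hpre
    obtain ⟨k, hk, hterm, hpass⟩ := hpre
    rw [if_pos rfl]
    exact pvA_eq_loop1 grid dr dc (pvFuel grid) k r c hk hterm hpass
  · by_cases h2 : box_size = 2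
    · subst h2
      rw [if_pos (Or.inr rfl)] at hpre
      obtain ⟨k, hk, hterm, hpass⟩ := hpre
      rw [if_neg (by norm_num), if_pos rfl]
      exact pvA_eq_loop2 grid dr dc (pvFuel grid) k r c hk hterm hpass
    · rw [if_neg (by tauto)] at hpre
      rw [if_neg h1, if_neg h2]
      have hf : pvFuel grid = (2 * (grid.length + (grid.map (fun s => s.length)).sum) + 1) + 1 := by
        unfold pvFuel; omega
      rw [hf, pvAWalk]
      cases hcell : pvCellAt grid (r + dr) (c + dc) with
      | none => simp [hcell] at hpre
      | some ch =>
        simp only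
        by_cases hH : ch = '#'
        · subst hH; simp
        · by_cases hD : ch = '.'
          · subst hD; simp
          · simp [hH, hD, h1, h2]
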